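-- pv_equiv track=rewrite | github.com/acedit/Python_kurs | week5'2/status.py | status_count
-- ===== SOURCE A (Python) =====
-- def status_count(students):
--
--     rechnik={
--         "finalized": [],
--         "not_finalized": []
--     }
--
--     for spisuk in students:
--
--         if spisuk["status"]=="finalized":
--             rechnik["finalized"]+=[spisuk["name"]]
--
--         else:
--             rechnik["not_finalized"]+=[spisuk["name"]]
--
--     return rechnik
-- ===== SOURCE B (Python) =====
-- def status_count(students):
--     def split(xs):
--         # divide and conquer: partition halves independently, merge with concatenation
--         if not xs:
--             return [], []
--         if len(xs) == 1:
--             s = xs[0]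
--             if s["status"] == "finalized":
--                 return [s["name"]], []
--             return [], [s["name"]]
--         mid = len(xs) // 2
--         f1, n1 = split(xs[:mid])
--         f2, n2 = split(xs[mid:])
--         return f1 + f2, n1 + n2
--
--     f, nf = split(students)
--     return {"finalized": f, "not_finalized": nf}
-- ===== Notes on version B (the rewrite author's own statement) =====
-- stated objective: alternative
-- what changed: Replaces the single left-to-right dispatching loop mutating a dict by a divide-and-conquer recursion that splits the list in halves, partitions each half independently and merges the group lists by concatenation (correct because concatenation preserves the relative order within each group).
import Mathlib
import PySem

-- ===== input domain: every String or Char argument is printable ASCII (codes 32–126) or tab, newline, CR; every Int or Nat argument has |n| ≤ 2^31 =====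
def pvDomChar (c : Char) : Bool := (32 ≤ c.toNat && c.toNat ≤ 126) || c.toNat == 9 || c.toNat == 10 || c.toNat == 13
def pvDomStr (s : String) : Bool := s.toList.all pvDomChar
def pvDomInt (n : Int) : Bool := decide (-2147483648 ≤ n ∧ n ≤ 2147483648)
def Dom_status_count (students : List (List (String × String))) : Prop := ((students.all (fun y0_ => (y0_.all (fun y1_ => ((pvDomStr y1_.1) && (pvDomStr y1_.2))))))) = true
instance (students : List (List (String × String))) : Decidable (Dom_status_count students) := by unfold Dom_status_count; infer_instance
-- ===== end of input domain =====

-- B partitions by divide and conquer (split in halves, merge by concatenation) instead of A's single dispatching loop; return value proved equal under Pre_.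

-- ===== PORT A =====
-- one dispatching loop mutating a two-key dict (spisuk["status"]/["name"] ported with getD; exact under Pre_, which guarantees both keys)
def status_count (students : List (List (String × String))) : List (String × List String) :=
  (students.foldl
    (fun rechnik spisuk =>
      if PySem.Dict.getD (PySem.Dict.mk spisuk) "status" "" == "finalized" then
        PySem.Dict.insert rechnik "finalized"
          (PySem.Dict.getD rechnik "finalized" [] ++ [PySem.Dict.getD (PySem.Dict.mk spisuk) "name" ""])
      else
        PySem.Dict.insert rechnik "not_finalized"
          (PySem.Dict.getD rechnik "not_finalized" [] ++ [PySem.Dict.getD (PySem.Dict.mk spisuk) "name" ""]))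
    (PySem.Dict.mk [("finalized", []), ("not_finalized", [])])).items

-- ===== PORT B =====
-- helper 'split' of Source B: divide and conquer, halves partitioned recursively, merged by ++
def scSplit : List (List (String × String)) → List String × List String
  | [] => ([], [])
  | [s] =>
      if PySem.Dict.getD (PySem.Dict.mk s) "status" "" == "finalized" then
        ([PySem.Dict.getD (PySem.Dict.mk s) "name" ""], [])
      else
        ([], [PySem.Dict.getD (PySem.Dict.mk s) "name" ""])
  | a :: b :: rest =>
      let mid := (a :: b :: rest).length / 2
      let p := scSplit ((a :: b :: rest).take mid)
      let q := scSplit ((a :: b :: rest).drop mid)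
      (p.1 ++ q.1, p.2 ++ q.2)
termination_by xs => xs.length
decreasing_by
  · simp [List.length_take]; omega
  · simp [List.length_drop]; omega

def status_count_alt (students : List (List (String × String))) : List (String × List String) :=
  let r := scSplit students
  [("finalized", r.1), ("not_finalized", r.2)]

-- ===== PRECONDITION & SPEC =====
-- Pre_ excludes exactly the students lacking a "status" or "name" key, on which A (and B) raises KeyError.
def Pre_status_count (students : List (List (String × String))) : Prop :=
  ∀ s ∈ students, (PySem.Dict.get? (PySem.Dict.mk s) "status").isSome ∧ (PySem.Dict.get? (PySem.Dict.mk s) "name").isSome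
instance (students : List (List (String × String))) : Decidable (Pre_status_count students) := by unfold Pre_status_count; infer_instance
def pvWitness_status_count : (List (List (String × String))) :=
  [[("status", "finalized"), ("name", "Ana")], [("status", "no"), ("name", "Bo")]]
def Spec_status_count (students : List (List (String × String))) (out : List (String × List String)) : Prop := out = status_count_alt students
instance (students : List (List (String × String))) (out : List (String × List String)) : Decidable (Spec_status_count students out) := by unfold Spec_status_count; infer_instance

-- ===== CLAIM (what is proved, stated in full; the proofs are below) =====
def Claim_equal_status_count : Prop := ∀ (students : List (List (String × String))), Dom_status_count students → Pre_status_count students → Spec_status_count students (status_count students)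

-- ===== LEMMAS AND PROOFS =====

-- the canonical partition both ports compute
def scFin (xs : List (List (String × String))) : List String :=
  (xs.filter (fun s => PySem.Dict.getD (PySem.Dict.mk s) "status" "" == "finalized")).map
    (fun s => PySem.Dict.getD (PySem.Dict.mk s) "name" "")
def scNon (xs : List (List (String × String))) : List String :=
  (xs.filter (fun s => !(PySem.Dict.getD (PySem.Dict.mk s) "status" "" == "finalized"))).map
    (fun s => PySem.Dict.getD (PySem.Dict.mk s) "name" "")

-- A's loop invariant: the fold only ever appends to the two fixed entries
theorem status_count_loop (students : List (List (String × String)))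
    (f nf : List String) :
    (students.foldl
      (fun rechnik spisuk =>
        if PySem.Dict.getD (PySem.Dict.mk spisuk) "status" "" == "finalized" then
          PySem.Dict.insert rechnik "finalized"
            (PySem.Dict.getD rechnik "finalized" [] ++ [PySem.Dict.getD (PySem.Dict.mk spisuk) "name" ""])
        else
          PySem.Dict.insert rechnik "not_finalized"
            (PySem.Dict.getD rechnik "not_finalized" [] ++ [PySem.Dict.getD (PySem.Dict.mk spisuk) "name" ""]))
      (PySem.Dict.mk [("finalized", f), ("not_finalized", nf)])).items
    = [("finalized", f ++ scFin students), ("not_finalized", nf ++ scNon students)] := by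
  induction students generalizing f nf with
  | nil => simp [scFin, scNon]
  | cons hd tl ih =>
    rw [List.foldl_cons]
    by_cases h : PySem.Dict.getD (PySem.Dict.mk hd) "status" "" == "finalized"
    all_goals simp only [beq_iff_eq] at h
    · have hstep :
        (if PySem.Dict.getD (PySem.Dict.mk hd) "status" "" == "finalized" then
          PySem.Dict.insert (PySem.Dict.mk [("finalized", f), ("not_finalized", nf)]) "finalized"
            (PySem.Dict.getD (PySem.Dict.mk [("finalized", f), ("not_finalized", nf)]) "finalized" [] ++
              [PySem.Dict.getD (PySem.Dict.mk hd) "name" ""])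
        else
          PySem.Dict.insert (PySem.Dict.mk [("finalized", f), ("not_finalized", nf)]) "not_finalized"
            (PySem.Dict.getD (PySem.Dict.mk [("finalized", f), ("not_finalized", nf)]) "not_finalized" [] ++
              [PySem.Dict.getD (PySem.Dict.mk hd) "name" ""]))
        = PySem.Dict.mk
            [("finalized", f ++ [PySem.Dict.getD (PySem.Dict.mk hd) "name" ""]), ("not_finalized", nf)] := by
        simp [PySem.Dict.insert, PySem.Dict.getD, PySem.Dict.get?, PySem.Dict.contains]
        exact h
      rw [hstep, ih]
      simp [scFin, scNon, h]
    · have hstep :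
        (if PySem.Dict.getD (PySem.Dict.mk hd) "status" "" == "finalized" then
          PySem.Dict.insert (PySem.Dict.mk [("finalized", f), ("not_finalized", nf)]) "finalized"
            (PySem.Dict.getD (PySem.Dict.mk [("finalized", f), ("not_finalized", nf)]) "finalized" [] ++
              [PySem.Dict.getD (PySem.Dict.mk hd) "name" ""])
        else
          PySem.Dict.insert (PySem.Dict.mk [("finalized", f), ("not_finalized", nf)]) "not_finalized"
            (PySem.Dict.getD (PySem.Dict.mk [("finalized", f), ("not_finalized", nf)]) "not_finalized" [] ++
              [PySem.Dict.getD (PySem.Dict.mk hd) "name" ""]))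
        = PySem.Dict.mk
            [("finalized", f), ("not_finalized", nf ++ [PySem.Dict.getD (PySem.Dict.mk hd) "name" ""])] := by
        simp [PySem.Dict.insert, PySem.Dict.getD, PySem.Dict.get?, PySem.Dict.contains]
        exact h
      rw [hstep, ih]
      simp [scFin, scNon, h]

-- B's divide-and-conquer computes the same partition (concatenation preserves each group's order)
theorem scSplit_eq (xs : List (List (String × String))) : scSplit xs = (scFin xs, scNon xs) := by
  induction xs using scSplit.induct with
  | case1 => simp [scSplit, scFin, scNon]
  | case2 s h => simp [scSplit, scFin, scNon, h]
  | case3 s h => simp [scSplit, scFin, scNon, h]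
  | case4 a b rest _mid ih1 ih2 =>
    rw [scSplit, ih1, ih2]
    conv_rhs => rw [← List.take_append_drop _mid (a :: b :: rest)]
    simp only [scFin, scNon, List.filter_append, List.map_append]

-- ===== VERDICT (by name: the statement is the Claim_ definition above) =====
theorem status_count_spec : Claim_equal_status_count := by
  intro students _ _
  unfold Spec_status_count status_count status_count_alt
  rw [status_count_loop, scSplit_eq]
  simp
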